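-- pv_equiv track=rewrite | github.com/dontlukeback/govcon-intel | publish_v2.py | extract_title_from_md
-- ===== SOURCE A (Python) =====
-- from typing import Dict, List, Optional, Tuple
--
-- def extract_title_from_md(md_text: str) -> Tuple[str, str]:
--     """Extract title and subtitle from markdown H1 and first italic line."""
--     title = ""
--     subtitle = ""
--     for line in md_text.split("\n"):
--         stripped = line.strip()
--         if stripped.startswith("# ") and not stripped.startswith("## "):
--             title = stripped[2:].strip()
--         elif stripped.startswith("*") and stripped.endswith("*") and not stripped.startswith("**"):
--             subtitle = stripped[1:-1].strip()
--             break
--     return title, subtitle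
-- ===== SOURCE B (Python) =====
-- def _is_h1(s):
--     return s.startswith("# ") and not s.startswith("## ")
--
-- def _is_italic(s):
--     return s.startswith("*") and s.endswith("*") and not s.startswith("**")
--
-- def extract_title_from_md(md_text):
--     """Extract title and subtitle from markdown H1 and first italic line."""
--     lines = md_text.split("\n")
--     # Pass 1: split the lines at the first italic line; it supplies the subtitle.
--     head = []
--     subtitle = ""
--     for line in lines:
--         s = line.strip()
--         if _is_italic(s):
--             subtitle = s[1:-1].strip()
--             break
--         head.append(line)
--     # Pass 2: the last H1 in the prefix supplies the title.
--     title = ""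
--     for line in head:
--         s = line.strip()
--         if _is_h1(s):
--             title = s[2:].strip()
--     return title, subtitle
-- ===== Notes on version B (the rewrite author's own statement) =====
-- stated objective: alternative
-- what changed: A's single interleaved loop (track title, break on the first italic line) is replaced by two separate passes: first split the line list at the first italic line (which yields the subtitle), then fold over the prefix keeping the last H1 as the title.
import Mathlib
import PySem

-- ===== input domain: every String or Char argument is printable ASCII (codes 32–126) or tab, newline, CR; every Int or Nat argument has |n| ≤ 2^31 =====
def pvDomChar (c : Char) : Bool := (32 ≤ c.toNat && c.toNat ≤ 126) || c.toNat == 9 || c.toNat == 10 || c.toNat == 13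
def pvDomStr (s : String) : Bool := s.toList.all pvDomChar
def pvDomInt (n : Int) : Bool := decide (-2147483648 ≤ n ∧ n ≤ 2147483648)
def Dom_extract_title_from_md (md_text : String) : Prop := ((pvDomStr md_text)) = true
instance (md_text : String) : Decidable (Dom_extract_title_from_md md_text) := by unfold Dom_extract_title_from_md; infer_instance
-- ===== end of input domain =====

-- B replaces A's single interleaved break-loop by two passes (split at the first
-- italic line, then fold the prefix for the last H1): objective 'alternative'.

-- ===== PORT A =====
-- A's single loop: state is the title so far; an italic line returns immediately (break).
def pvLoopA : List String → String → String × String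
  | [], title => (title, "")
  | line :: rest, title =>
    let stripped := PySem.Str.strip line
    if PySem.Str.startswith stripped "# " && !(PySem.Str.startswith stripped "## ") then
      pvLoopA rest (PySem.Str.strip (PySem.Str.slice stripped (some 2) none))
    else if PySem.Str.startswith stripped "*" && PySem.Str.endswith stripped "*" &&
            !(PySem.Str.startswith stripped "**") then
      (title, PySem.Str.strip (PySem.Str.slice stripped (some 1) (some (-1))))
    else
      pvLoopA rest title

def extract_title_from_md (md_text : String) : String × String :=
  pvLoopA ((PySem.Str.split? md_text "\n").getD []) ""

-- ===== PORT B =====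
def pvIsH1 (s : String) : Bool :=
  PySem.Str.startswith s "# " && !(PySem.Str.startswith s "## ")

def pvIsItalic (s : String) : Bool :=
  PySem.Str.startswith s "*" && PySem.Str.endswith s "*" && !(PySem.Str.startswith s "**")

-- Pass 1 of Source B: the lines before the first italic line, and the subtitle it yields.
def pvSplitAtItalic : List String → List String × String
  | [] => ([], "")
  | line :: rest =>
    let s := PySem.Str.strip line
    if pvIsItalic s then ([], PySem.Str.strip (PySem.Str.slice s (some 1) (some (-1))))
    else
      let r := pvSplitAtItalic rest
      (line :: r.1, r.2)

-- Pass 2 of Source B: keep the last H1's content.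
def pvTitleStep (t : String) (line : String) : String :=
  let s := PySem.Str.strip line
  if pvIsH1 s then PySem.Str.strip (PySem.Str.slice s (some 2) none) else t

def extract_title_from_md_alt (md_text : String) : String × String :=
  let lines := (PySem.Str.split? md_text "\n").getD []
  let p := pvSplitAtItalic lines
  (p.1.foldl pvTitleStep "", p.2)

-- ===== PRECONDITION & SPEC =====
def Spec_extract_title_from_md (md_text : String) (out : String × String) : Prop := out = extract_title_from_md_alt md_text
instance (md_text : String) (out : String × String) : Decidable (Spec_extract_title_from_md md_text out) := by unfold Spec_extract_title_from_md; infer_instance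

-- ===== CLAIM (what is proved, stated in full; the proofs are below) =====
def Claim_equal_extract_title_from_md : Prop := ∀ (md_text : String), Dom_extract_title_from_md md_text → Spec_extract_title_from_md md_text (extract_title_from_md md_text)

-- ===== LEMMAS AND PROOFS =====

lemma hash_not_star (s : String) (h : PySem.Str.startswith s "# " = true) :
    PySem.Str.startswith s "*" = false := by
  by_contra hne
  have hi : PySem.Str.startswith s "*" = true := by
    revert hne; cases PySem.Str.startswith s "*" <;> simp
  have hp : "# ".toList <+: s.toList := (PySem.Chars.startswith_iff _ _).1 (by simpa using h)
  have hq : "*".toList <+: s.toList := (PySem.Chars.startswith_iff _ _).1 (by simpa using hi)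
  obtain ⟨u, hu⟩ := hp
  obtain ⟨v, hv⟩ := hq
  rw [← hu] at hv
  simp at hv
lemma loopA_cons (line : String) (rest : List String) (t : String) :
    pvLoopA (line :: rest) t =
      if pvIsItalic (PySem.Str.strip line) = true then
        (t, PySem.Str.strip (PySem.Str.slice (PySem.Str.strip line) (some 1) (some (-1))))
      else pvLoopA rest (pvTitleStep t line) := by
  show (if pvIsH1 (PySem.Str.strip line) = true then
          pvLoopA rest (PySem.Str.strip (PySem.Str.slice (PySem.Str.strip line) (some 2) none))
        else if pvIsItalic (PySem.Str.strip line) = true then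
          (t, PySem.Str.strip (PySem.Str.slice (PySem.Str.strip line) (some 1) (some (-1))))
        else pvLoopA rest t) = _
  by_cases h1 : pvIsH1 (PySem.Str.strip line) = true
  · have hs : PySem.Str.startswith (PySem.Str.strip line) "# " = true := by
      have := h1
      simp only [pvIsH1, Bool.and_eq_true] at this
      exact this.1
    have hni : pvIsItalic (PySem.Str.strip line) = false := by
      simp only [pvIsItalic, hash_not_star _ hs, Bool.false_and]
    rw [if_pos h1, if_neg (by simp [hni])]
    rw [show pvTitleStep t line = PySem.Str.strip (PySem.Str.slice (PySem.Str.strip line) (some 2)) from by simp [pvTitleStep, h1]]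
  · rw [if_neg h1]
    rw [show pvTitleStep t line = t from by simp [pvTitleStep, h1]]

lemma splitAtItalic_cons (line : String) (rest : List String) :
    pvSplitAtItalic (line :: rest) =
      if pvIsItalic (PySem.Str.strip line) = true then
        ([], PySem.Str.strip (PySem.Str.slice (PySem.Str.strip line) (some 1) (some (-1))))
      else (line :: (pvSplitAtItalic rest).1, (pvSplitAtItalic rest).2) := by
  show (if pvIsItalic (PySem.Str.strip line) = true then
          ([], PySem.Str.strip (PySem.Str.slice (PySem.Str.strip line) (some 1) (some (-1))))
        else ((line :: (pvSplitAtItalic rest).1, (pvSplitAtItalic rest).2) : List String × String)) = _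
  rfl

-- A's loop computes exactly B's two passes, for any accumulated title.
lemma loopA_eq (ls : List String) (t : String) :
    pvLoopA ls t = ((pvSplitAtItalic ls).1.foldl pvTitleStep t, (pvSplitAtItalic ls).2) := by
  induction ls generalizing t with
  | nil => rfl
  | cons line rest ih =>
    rw [loopA_cons, splitAtItalic_cons]
    by_cases hi : pvIsItalic (PySem.Str.strip line) = true
    · rw [if_pos hi, if_pos hi]
      rfl
    · rw [if_neg hi, if_neg hi]
      simp only [List.foldl_cons]
      exact ih (pvTitleStep t line)

-- ===== VERDICT (by name: the statement is the Claim_ definition above) =====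
theorem extract_title_from_md_spec : Claim_equal_extract_title_from_md := by
  intro md_text _
  unfold Spec_extract_title_from_md extract_title_from_md extract_title_from_md_alt
  simp only [loopA_eq]
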